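-- pv_equiv track=rewrite | github.com/Theo0x1337/PolyChess | blocageFou.py | monterDroite
-- ===== SOURCE A (Python) =====
-- def monterDroite(pos):#WORK
--     #x=x+1
--     #y=y-1
--     res=[]
--     x=pos[0]
--     y=pos[1]
--     while x < 7  and y > 0 :
--         x=x+1
--         y=y-1
--         res.append([x,y])
--     return res
-- ===== SOURCE B (Python) =====
-- def monterDroite(pos):
--     n = min(7 - pos[0], pos[1])
--     if n < 0:
--         n = 0
--     return [[pos[0] + i, pos[1] - i] for i in range(1, n + 1)]
-- ===== Notes on version B (the rewrite author's own statement) =====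
-- stated objective: simpler
-- what changed: Replaces the while-loop with mutable x,y,res by a precomputed trip count n = max(min(7-pos[0], pos[1]), 0) and a single comprehension over range(1, n+1).
import Mathlib
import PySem

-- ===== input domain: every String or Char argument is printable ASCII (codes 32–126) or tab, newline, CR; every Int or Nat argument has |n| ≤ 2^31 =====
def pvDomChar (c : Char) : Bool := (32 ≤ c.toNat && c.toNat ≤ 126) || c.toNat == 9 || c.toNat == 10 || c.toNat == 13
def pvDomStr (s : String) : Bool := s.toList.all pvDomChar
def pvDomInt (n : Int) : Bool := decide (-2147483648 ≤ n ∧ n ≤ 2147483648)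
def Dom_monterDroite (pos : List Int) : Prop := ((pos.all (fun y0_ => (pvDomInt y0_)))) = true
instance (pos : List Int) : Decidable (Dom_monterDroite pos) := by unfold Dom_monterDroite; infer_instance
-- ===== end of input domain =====

-- B replaces A's mutable while-loop with a precomputed step count and one comprehension (objective: simpler).

-- ===== PORT A =====
-- the while-loop: state (x, y, res); terminates because 7 - x strictly decreases while x < 7
def monterDroiteLoop (x y : Int) (res : List (List Int)) : List (List Int) :=
  if x < 7 ∧ y > 0 then
    monterDroiteLoop (x + 1) (y - 1) (res ++ [[x + 1, y - 1]])
  else res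
termination_by (7 - x).toNat
decreasing_by omega

def monterDroite (pos : List Int) : List (List Int) :=
  -- x = pos[0]; y = pos[1]  (in-range under Pre_, so pyGetD is exact)
  monterDroiteLoop (PySem.List.pyGetD pos 0 0) (PySem.List.pyGetD pos 1 0) []

-- ===== PORT B =====
def monterDroite_alt (pos : List Int) : List (List Int) :=
  let x0 := PySem.List.pyGetD pos 0 0
  let y0 := PySem.List.pyGetD pos 1 0
  let n0 := min (7 - x0) y0
  let n := if n0 < 0 then 0 else n0
  (PySem.List.pyRange 1 (n + 1) 1).map (fun i => [x0 + i, y0 - i])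

-- ===== PRECONDITION & SPEC =====
-- A raises IndexError when pos has fewer than two elements (so does B); exactly those inputs are excluded.
def Pre_monterDroite (pos : List Int) : Prop := 2 ≤ pos.length
instance (pos : List Int) : Decidable (Pre_monterDroite pos) := by unfold Pre_monterDroite; infer_instance
def pvWitness_monterDroite : List Int := [3, 5]
def Spec_monterDroite (pos : List Int) (out : List (List Int)) : Prop := out = monterDroite_alt pos
instance (pos : List Int) (out : List (List Int)) : Decidable (Spec_monterDroite pos out) := by unfold Spec_monterDroite; infer_instance

-- ===== CLAIM (what is proved, stated in full; the proofs are below) =====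
def Claim_equal_monterDroite : Prop := ∀ (pos : List Int), Dom_monterDroite pos → Pre_monterDroite pos → Spec_monterDroite pos (monterDroite pos)

-- ===== LEMMAS AND PROOFS =====

-- characterisation of the loop: it emits [x+i, y-i] for i = 1 .. max (min (7-x) y) 0
theorem monterDroiteLoop_eq (x y : Int) (res : List (List Int)) :
    monterDroiteLoop x y res =
      res ++ (PySem.List.pyRange 1 (max (min (7 - x) y) 0 + 1) 1).map (fun i => [x + i, y - i]) := by
  by_cases h : x < 7 ∧ y > 0
  · rw [monterDroiteLoop, if_pos h, monterDroiteLoop_eq (x + 1) (y - 1)]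
    have h1 : (1 : Int) < max (min (7 - x) y) 0 + 1 := by omega
    rw [PySem.List.pyRange_one_cons h1]
    have h2 : max (min (7 - (x + 1)) (y - 1)) 0 + 1 = max (min (7 - x) y) 0 := by omega
    have h3 : PySem.List.pyRange 2 (max (min (7 - x) y) 0 + 1) 1
        = (PySem.List.pyRange 1 (max (min (7 - (x + 1)) (y - 1)) 0 + 1) 1).map (fun i => i + 1) := by
      rw [h2, PySem.List.pyRange_one, PySem.List.pyRange_one, List.map_map]
      have : ((max (min (7 - x) y) 0 + 1) - 2).toNat = (max (min (7 - x) y) 0 - 1).toNat := by omega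
      rw [this]
      apply List.map_congr_left; intro k _; simp; ring
    have h4 : (1 : Int) + 1 = 2 := rfl
    rw [h4, h3]
    simp only [List.map_cons, List.map_map, List.append_assoc, List.cons_append, List.nil_append]
    congr 2
    apply List.map_congr_left; intro i _
    simp only [Function.comp_apply]
    have e1 : x + 1 + i = x + (i + 1) := by ring
    have e2 : y - 1 - i = y - (i + 1) := by ring
    rw [e1, e2]
  · rw [monterDroiteLoop, if_neg h]
    have : max (min (7 - x) y) 0 = 0 := by omega
    rw [this]
    have h5 : (0 : Int) + 1 = 1 := rfl
    rw [h5, PySem.List.pyRange_one_eq_nil le_rfl]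
    simp
termination_by (7 - x).toNat
decreasing_by omega

-- ===== VERDICT (by name: the statement is the Claim_ definition above) =====
theorem monterDroite_spec : Claim_equal_monterDroite := by
  intro pos _ _
  unfold Spec_monterDroite monterDroite monterDroite_alt
  rw [monterDroiteLoop_eq]
  simp only [List.nil_append]
  have : (if min (7 - PySem.List.pyGetD pos 0 0) (PySem.List.pyGetD pos 1 0) < 0 then (0:Int)
      else min (7 - PySem.List.pyGetD pos 0 0) (PySem.List.pyGetD pos 1 0))
      = max (min (7 - PySem.List.pyGetD pos 0 0) (PySem.List.pyGetD pos 1 0)) 0 := by omega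
  simp only [this]
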